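-- pv_equiv track=rewrite | github.com/hyunsik4476/SWEA | 0329/5203_babygin.py | runcheck
-- ===== SOURCE A (Python) =====
-- def runcheck(input_lst):
--     cnt = 1
--     for i in range(1, len(input_lst)):
--         if input_lst[i-1] and input_lst[i]:
--             cnt += 1
--             if cnt == 3:
--                 return 1
--         else:
--             cnt = 1
-- ===== SOURCE B (Python) =====
-- def runcheck(input_lst):
--     if any(a and b and c for a, b, c in zip(input_lst, input_lst[1:], input_lst[2:])):
--         return 1
-- ===== Notes on version B (the rewrite author's own statement) =====
-- stated objective: idiomatic
-- what changed: Replaced the resetting run-counter state machine over indices with a stateless any() over the overlapping length-3 windows obtained by zipping the list with its two shifts.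
import Mathlib
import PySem

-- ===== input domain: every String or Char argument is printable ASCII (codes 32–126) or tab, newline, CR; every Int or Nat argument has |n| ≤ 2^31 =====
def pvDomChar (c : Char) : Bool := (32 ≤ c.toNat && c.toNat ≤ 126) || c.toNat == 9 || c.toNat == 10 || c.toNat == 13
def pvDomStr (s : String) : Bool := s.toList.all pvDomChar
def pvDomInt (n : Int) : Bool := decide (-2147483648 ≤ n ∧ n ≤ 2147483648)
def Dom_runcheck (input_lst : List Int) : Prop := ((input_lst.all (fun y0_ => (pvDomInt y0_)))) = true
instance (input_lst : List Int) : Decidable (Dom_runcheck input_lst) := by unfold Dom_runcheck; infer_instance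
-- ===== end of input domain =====

-- B replaces A's resetting run-counter state machine with a stateless any() over the length-3 windows (idiomatic); same result on every input.

-- ===== PORT A =====
-- the loop 'for i in range(1, len(input_lst))' with early return, state cnt;
-- indices i-1 and i are always in range here, so pyGetD with default 0 is exact
def runcheckGo (l : List Int) : List Int → Int → Option Int
  | [], _ => none
  | i :: rest, cnt =>
    if PySem.List.pyGetD l (i - 1) 0 ≠ 0 ∧ PySem.List.pyGetD l i 0 ≠ 0 then
      (if cnt + 1 = 3 then some 1 else runcheckGo l rest (cnt + 1))
    else runcheckGo l rest 1

def runcheck (input_lst : List Int) : Option Int :=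
  runcheckGo input_lst (PySem.List.pyRange 1 input_lst.length 1) 1

-- ===== PORT B =====
def runcheck_alt (input_lst : List Int) : Option Int :=
  if (List.zip input_lst
        (List.zip (PySem.List.slice input_lst (some 1) none)
                  (PySem.List.slice input_lst (some 2) none))).any
       (fun p => p.1 != 0 && p.2.1 != 0 && p.2.2 != 0)
  then some 1 else none

-- ===== PRECONDITION & SPEC =====
def Spec_runcheck (input_lst : List Int) (out : Option Int) : Prop := out = runcheck_alt input_lst
instance (input_lst : List Int) (out : Option Int) : Decidable (Spec_runcheck input_lst out) := by unfold Spec_runcheck; infer_instance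

-- ===== CLAIM (what is proved, stated in full; the proofs are below) =====
def Claim_equal_runcheck : Prop := ∀ (input_lst : List Int), Dom_runcheck input_lst → Spec_runcheck input_lst (runcheck input_lst)

-- ===== LEMMAS AND PROOFS =====

-- pure list form of A's loop (bridge between the two ports)
def pvF : List Int → Int → Option Int
  | a :: b :: rest, cnt =>
    if a ≠ 0 ∧ b ≠ 0 then
      (if cnt + 1 = 3 then some 1 else pvF (b :: rest) (cnt + 1))
    else pvF (b :: rest) 1
  | _, _ => none

-- the window predicate B computes, in drop form
def pvW (l : List Int) : Option Int :=
  if (List.zip l (List.zip (l.drop 1) (l.drop 2))).any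
      (fun p => p.1 != 0 && p.2.1 != 0 && p.2.2 != 0) then some 1 else none

theorem pvF_short (l : List Int) (cnt : Int) (h : l.length ≤ 1) : pvF l cnt = none := by
  match l with
  | [] => rfl
  | [a] => rfl
  | a :: b :: r => simp at h

theorem pvW_short (l : List Int) (h : l.length ≤ 2) : pvW l = none := by
  match l with
  | [] => rfl
  | [a] => rfl
  | [a, b] => rfl
  | a :: b :: c :: r => simp at h

theorem pvW_cons (a b c : Int) (r : List Int) :
    pvW (a :: b :: c :: r) = if a ≠ 0 ∧ b ≠ 0 ∧ c ≠ 0 then some 1 else pvW (b :: c :: r) := by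
  unfold pvW
  simp only [List.drop_succ_cons, List.drop_zero, List.zip_cons_cons,
    List.any_cons]
  by_cases h : a ≠ 0 ∧ b ≠ 0 ∧ c ≠ 0
  · simp [h.1, h.2.1, h.2.2]
  · simp only [ne_eq, not_and_or, not_not] at h
    rcases h with h | h | h <;> subst h <;>
      simp only [bne_self_eq_false, Bool.false_and, Bool.and_false, Bool.false_or] <;> norm_num

theorem pvF_main : ∀ l : List Int,
    (pvF l 1 = pvW l) ∧
    (pvF l 2 = match l with
               | b :: c :: r => if b ≠ 0 ∧ c ≠ 0 then some 1 else pvW (c :: r)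
               | _ => none) := by
  intro l
  induction l with
  | nil => exact ⟨rfl, rfl⟩
  | cons a t ih =>
    constructor
    · match t, ih with
      | [], _ => rfl
      | b :: r, ih =>
        rw [pvF]
        by_cases hab : a ≠ 0 ∧ b ≠ 0
        · rw [if_pos hab]
          norm_num
          rw [ih.2]
          match r with
          | [] => rw [pvW_short _ (by simp)]
          | c :: r' =>
            rw [pvW_cons]
            by_cases hc : c ≠ 0
            · simp [hab.1, hab.2, hc]
            · simp only [ne_eq, not_not] at hc
              subst hc
              simp only [ne_eq, not_true_eq_false, and_false, if_false, and_false]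
              match r' with
              | [] => rw [pvW_short _ (by simp), pvW_short _ (by simp)]
              | d :: r'' => rw [pvW_cons]; simp
        · rw [if_neg hab, ih.1]
          match r with
          | [] => rw [pvW_short _ (by simp), pvW_short _ (by simp)]
          | c :: r' =>
            rw [pvW_cons]
            have : ¬ (a ≠ 0 ∧ b ≠ 0 ∧ c ≠ 0) := by tauto
            rw [if_neg this]
    · match t, ih with
      | [], _ => rfl
      | b :: r, ih =>
        show pvF (a :: b :: r) 2 = if a ≠ 0 ∧ b ≠ 0 then some 1 else pvW (b :: r)
        rw [pvF]
        by_cases hab : a ≠ 0 ∧ b ≠ 0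
        · rw [if_pos hab, if_pos hab]; norm_num
        · rw [if_neg hab, if_neg hab, ih.1]

theorem go_eq (l : List Int) : ∀ (k j : Nat) (cnt : Int), l.length - j ≤ k → 1 ≤ j →
    runcheckGo l (PySem.List.pyRange (j : Int) (l.length : Int) 1) cnt = pvF (l.drop (j - 1)) cnt := by
  intro k
  induction k with
  | zero =>
    intro j cnt hk hj
    rw [PySem.List.pyRange_one_eq_nil (by omega : (l.length : Int) ≤ (j : Int))]
    rw [pvF_short _ _ (by rw [List.length_drop]; omega)]
    rfl
  | succ k ih =>
    intro j cnt hk hj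
    by_cases hlt : j < l.length
    · rw [PySem.List.pyRange_one_cons (by exact_mod_cast hlt)]
      have h1 : (j : Int) - 1 = ((j - 1 : Nat) : Int) := by omega
      have hd2 : l.drop j = l[j] :: l.drop (j + 1) := List.drop_eq_getElem_cons hlt
      have hd : l.drop (j - 1) = l[j - 1] :: l[j] :: l.drop (j + 1) := by
        rw [List.drop_eq_getElem_cons (by omega : j - 1 < l.length)]
        rw [show j - 1 + 1 = j by omega, hd2]
      have g1 : PySem.List.pyGetD l ((j : Int) - 1) 0 = l[j - 1] := by
        rw [h1, PySem.List.pyGetD_natCast, List.getD_eq_getElem _ _ (by omega)]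
      have g2 : PySem.List.pyGetD l (j : Int) 0 = l[j] := by
        rw [PySem.List.pyGetD_natCast, List.getD_eq_getElem _ _ hlt]
      have hcast : (j : Int) + 1 = ((j + 1 : Nat) : Int) := by omega
      rw [runcheckGo, hd, pvF, g1, g2]
      have hih : ∀ c : Int, runcheckGo l (PySem.List.pyRange ((j : Int) + 1) (l.length : Int) 1) c
          = pvF (l[j] :: l.drop (j + 1)) c := by
        intro c
        rw [hcast, ih (j + 1) c (by omega) (by omega), show j + 1 - 1 = j by omega, hd2]
      by_cases hab : l[j - 1] ≠ 0 ∧ l[j] ≠ 0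
      · simp only [if_pos hab]
        by_cases h3 : cnt + 1 = 3
        · simp [h3]
        · simp only [if_neg h3]
          exact hih (cnt + 1)
      · simp only [if_neg hab]
        exact hih 1
    · rw [PySem.List.pyRange_one_eq_nil (by omega : (l.length : Int) ≤ (j : Int))]
      rw [pvF_short _ _ (by rw [List.length_drop]; omega)]
      rfl

theorem runcheck_eq (l : List Int) : runcheck l = runcheck_alt l := by
  have hgo := go_eq l l.length 1 1 (by omega) (by omega)
  have h1 : PySem.List.slice l (some 1) none = l.drop 1 := by
    rw [PySem.List.slice_from_one, List.drop_one]
  have h2 : PySem.List.slice l (some 2) none = l.drop 2 := by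
    have := PySem.List.slice_from (xs := l) (a := 2) (by omega)
    simpa using this
  unfold runcheck runcheck_alt
  rw [show ((1 : Nat) : Int) = 1 from rfl] at hgo
  rw [hgo, List.drop_zero, (pvF_main l).1, h1, h2]
  rfl

-- ===== VERDICT (by name: the statement is the Claim_ definition above) =====
theorem runcheck_spec : Claim_equal_runcheck := by
  intro l _
  exact runcheck_eq l
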